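-- pv_equiv track=rewrite | github.com/RhytmicRider/P3_Start_L3 | startcode/b_afvlakking/afvlakking.py | aantal_vakjes
-- ===== SOURCE A (Python) =====
-- def aantal_vakjes (getallen:list):
--     totaal = 0
--     huidig_maximum = getallen[0]
--     for i in range(len(getallen)):
--         if getallen[i] < huidig_maximum:
--             totaal += huidig_maximum - getallen[i]
--         else:
--             huidig_maximum = getallen[i]
--     return totaal
-- ===== SOURCE B (Python) =====
-- def aantal_vakjes(getallen: list):
--     maxima = []
--     for g in getallen:
--         maxima.append(g if not maxima or g > maxima[-1] else maxima[-1])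
--     return sum(maxima) - sum(getallen)
-- ===== Notes on version B (the rewrite author's own statement) =====
-- stated objective: alternative
-- what changed: B materializes the running-maximum table in one loop and returns the closed-form difference sum(prefix_max) - sum(getallen), instead of interleaving the comparison and gap accumulation in a single stateful pass.
import Mathlib
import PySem

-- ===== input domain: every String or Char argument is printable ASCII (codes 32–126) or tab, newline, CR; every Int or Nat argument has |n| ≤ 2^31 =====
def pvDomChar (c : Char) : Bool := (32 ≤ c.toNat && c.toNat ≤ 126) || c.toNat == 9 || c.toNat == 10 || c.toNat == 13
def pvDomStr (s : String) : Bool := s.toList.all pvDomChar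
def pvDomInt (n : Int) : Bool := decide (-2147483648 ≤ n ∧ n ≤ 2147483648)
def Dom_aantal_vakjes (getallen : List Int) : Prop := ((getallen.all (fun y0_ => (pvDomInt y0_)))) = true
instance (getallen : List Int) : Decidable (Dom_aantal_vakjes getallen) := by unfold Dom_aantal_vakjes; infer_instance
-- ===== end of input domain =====

-- B builds the running-maximum table in one loop and returns sum(prefix_max) - sum(getallen)
-- instead of A's interleaved gap accumulation; same O(n) cost, different decomposition.

-- ===== PORT A =====
-- the 'for i in range(len(getallen))' loop over state (totaal, huidig_maximum)
def avLoop (getallen : List Int) (h0 : Int) : Int :=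
  let r := (PySem.List.pyRange 0 (getallen.length : Int) 1).foldl
      (fun (st : Int × Int) i =>
        let g := PySem.List.pyGetD getallen i 0
        if g < st.2 then (st.1 + (st.2 - g), st.2) else (st.1, g))
      ((0 : Int), h0)
  r.1

def aantal_vakjes (getallen : List Int) : Int :=
  match PySem.List.pyGet? getallen 0 with
  | none => 0  -- unreachable under Pre_ (Python raises IndexError here)
  | some h0 => avLoop getallen h0

-- ===== PORT B =====
-- the loop 'maxima.append(g if not maxima or g > maxima[-1] else maxima[-1])'
def buildMaxima (acc : List Int) : List Int → List Int
  | [] => acc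
  | g :: rest =>
    let m := match acc.getLast? with
      | none => g
      | some l => if g > l then g else l
    buildMaxima (acc ++ [m]) rest

def aantal_vakjes_alt (getallen : List Int) : Int :=
  (buildMaxima [] getallen).sum - getallen.sum

-- ===== PRECONDITION & SPEC =====
-- Python A reads the first element and so raises IndexError on the empty list; Pre_ excludes exactly that input.
def Pre_aantal_vakjes (getallen : List Int) : Prop := getallen ≠ []
instance (getallen : List Int) : Decidable (Pre_aantal_vakjes getallen) := by unfold Pre_aantal_vakjes; infer_instance
def pvWitness_aantal_vakjes : List Int := [3, 1, 2]

def Spec_aantal_vakjes (getallen : List Int) (out : Int) : Prop := out = aantal_vakjes_alt getallen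
instance (getallen : List Int) (out : Int) : Decidable (Spec_aantal_vakjes getallen out) := by unfold Spec_aantal_vakjes; infer_instance

-- ===== CLAIM (what is proved, stated in full; the proofs are below) =====
def Claim_equal_aantal_vakjes : Prop := ∀ (getallen : List Int), Dom_aantal_vakjes getallen → Pre_aantal_vakjes getallen → Spec_aantal_vakjes getallen (aantal_vakjes getallen)

-- ===== LEMMAS AND PROOFS =====

-- prefix maxima continuing from a current maximum m
def pm (m : Int) : List Int → List Int
  | [] => []
  | g :: r => let m' := if g < m then m else g; m' :: pm m' r

theorem loopA_eq (xs : List Int) : ∀ (t m : Int),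
    (xs.foldl (fun (st : Int × Int) g =>
        if g < st.2 then (st.1 + (st.2 - g), st.2) else (st.1, g)) (t, m)).1
      = t + (pm m xs).sum - xs.sum := by
  induction xs with
  | nil => intro t m; simp [pm]
  | cons g r ih =>
    intro t m
    simp only [List.foldl_cons, pm, List.sum_cons]
    by_cases h : g < m
    · simp only [if_pos h, ih]; omega
    · simp only [if_neg h, ih]; omega

theorem buildMaxima_eq (xs : List Int) : ∀ (acc : List Int) (m : Int),
    acc.getLast? = some m → buildMaxima acc xs = acc ++ pm m xs := by
  induction xs with
  | nil => intro acc m _; simp [buildMaxima, pm]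
  | cons g r ih =>
    intro acc m h
    have hm : (if g > m then g else m) = (if g < m then m else g) := by
      rcases lt_trichotomy g m with hc | hc | hc <;> simp [hc] <;> omega
    simp only [buildMaxima, h, pm]
    rw [ih (acc ++ [if g > m then g else m]) (if g > m then g else m) (by simp)]
    simp [hm]

-- ===== VERDICT (by name: the statement is the Claim_ definition above) =====
theorem aantal_vakjes_spec : Claim_equal_aantal_vakjes := by
  intro getallen _ hpre
  unfold Spec_aantal_vakjes aantal_vakjes avLoop aantal_vakjes_alt
  match getallen, hpre with
  | g :: rest, _ =>
    have hget : PySem.List.pyGet? (g :: rest) (0 : Int) = some g := by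
      simp [PySem.List.pyGet?, PySem.List.pyIdx?]
    rw [hget]
    simp only []
    rw [PySem.List.foldl_pyRange_zero_pyGetD' (g :: rest) 0
      (fun (st : Int × Int) g =>
        if g < st.2 then (st.1 + (st.2 - g), st.2) else (st.1, g)) ((0 : Int), g)]
    rw [loopA_eq]
    have hbm : buildMaxima [] (g :: rest) = [g] ++ pm g rest := by
      simp only [buildMaxima]
      exact buildMaxima_eq rest [g] g (by simp)
    rw [hbm]
    simp [pm]
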